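-- pv_equiv track=rewrite | github.com/Justin21523/animation-ai-studio | scripts/agent/reasoning/reasoning_module.py | _parse_cot_response
-- ===== SOURCE A (Python) =====
-- from typing import List, Dict, Any, Optional, Callable
--
-- def _parse_cot_response(response: str) -> List[str]:
--     """Parse CoT response into steps"""
--     steps = []
--
--     # Split by "Step" markers
--     lines = response.split('\n')
--     current_step = ""
--
--     for line in lines:
--         line = line.strip()
--         if line.startswith("Step ") and current_step:
--             steps.append(current_step.strip())
--             current_step = line
--         else:
--             current_step += " " + line
--
--     if current_step:
--         steps.append(current_step.strip())
--
--     # Remove "Step N:" prefix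
--     steps = [step.split(":", 1)[-1].strip() for step in steps if step]
--
--     return steps if steps else [response]
-- ===== SOURCE B (Python) =====
-- from typing import List
--
-- def _parse_cot_response(response: str) -> List[str]:
--     """Parse CoT response into steps (boundary/slice formulation)."""
--     lines = [line.strip() for line in response.split('\n')]
--
--     # Group boundaries: index 0 always starts a group; each later line that
--     # starts with "Step " begins a new group.
--     bounds = [i for i, line in enumerate(lines)
--               if i == 0 or line.startswith("Step ")]
--
--     groups = [lines[a:b] for a, b in zip(bounds, bounds[1:] + [len(lines)])]
--     steps = [' '.join(g).strip() for g in groups]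
--
--     # Remove "Step N:" prefix
--     steps = [step.split(":", 1)[-1].strip() for step in steps if step]
--
--     return steps if steps else [response]
-- ===== Notes on version B (the rewrite author's own statement) =====
-- stated objective: alternative
-- what changed: A accumulates one growing string while scanning lines and flushes it at each 'Step ' marker; B instead computes the group boundary indices in one comprehension, slices the stripped-line list at those boundaries, and space-joins each slice.
import Mathlib
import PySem

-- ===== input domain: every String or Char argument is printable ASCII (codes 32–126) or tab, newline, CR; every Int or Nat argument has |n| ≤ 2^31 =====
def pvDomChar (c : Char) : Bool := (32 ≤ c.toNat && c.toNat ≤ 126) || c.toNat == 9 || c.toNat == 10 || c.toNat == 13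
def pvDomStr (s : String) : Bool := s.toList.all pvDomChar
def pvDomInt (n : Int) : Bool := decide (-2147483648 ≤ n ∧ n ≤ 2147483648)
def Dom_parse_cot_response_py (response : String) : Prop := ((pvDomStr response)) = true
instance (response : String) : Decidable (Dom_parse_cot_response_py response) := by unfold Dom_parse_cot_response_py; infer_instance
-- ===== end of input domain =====

-- B replaces A's single-pass string accumulator by a boundary/slice decomposition
-- (compute group boundaries, slice the line list, join each group); same return
-- value everywhere, objective: alternative decomposition (no speed claim).

-- shared helper: the Python sub-expression  step.split(":", 1)[-1].strip(),
-- identical in both sources.  splitMax? with a nonempty separator is always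
-- `some` of a nonempty list, so both `getD []` defaults are never used (no raise).
def pvStepTail (s : List Char) : List Char :=
  PySem.Chars.strip ((PySem.List.pyGet? ((PySem.Chars.splitMax? s [':'] 1).getD []) (-1)).getD [])

-- line.startswith("Step ")
def pvIsStep (l : List Char) : Bool := PySem.Chars.startswith l "Step ".toList

-- ===== PORT A =====
-- the for-loop: state (steps, current_step); each line is stripped, then either
-- flushes current_step (a "Step " line with a nonempty accumulator) or is appended.
def pvLoopA : List (List Char) → List (List Char) → List Char → List (List Char) × List Char
  | [], steps, cur => (steps, cur)
  | l :: rest, steps, cur =>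
    let ls := PySem.Chars.strip l
    if pvIsStep ls && !cur.isEmpty then
      pvLoopA rest (steps ++ [PySem.Chars.strip cur]) ls
    else
      pvLoopA rest steps (cur ++ (' ' :: ls))

def parse_cot_response_py (response : String) : List String :=
  let lines := PySem.Chars.splitOn response.toList ['\n']
  let r := pvLoopA lines [] []
  let steps := if !r.2.isEmpty then r.1 ++ [PySem.Chars.strip r.2] else r.1
  let steps := (steps.filter (fun s => !s.isEmpty)).map pvStepTail
  if !steps.isEmpty then steps.map String.ofList else [response]

-- ===== PORT B =====
-- [i for i, line in enumerate(lines) if i == 0 or line.startswith("Step ")]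
def pvBounds (ms : List (List Char)) : List Int :=
  (PySem.List.enumerate ms).filterMap (fun q => if q.1 == 0 || pvIsStep q.2 then some q.1 else none)

def parse_cot_response_py_alt (response : String) : List String :=
  let lines := (PySem.Chars.splitOn response.toList ['\n']).map PySem.Chars.strip
  let bounds := pvBounds lines
  let groups := (bounds.zip (bounds.tail ++ [(lines.length : Int)])).map
    (fun q => PySem.List.slice lines (some q.1) (some q.2))
  let steps := groups.map (fun g => PySem.Chars.strip (PySem.Chars.join [' '] g))
  let steps := (steps.filter (fun s => !s.isEmpty)).map pvStepTail
  if !steps.isEmpty then steps.map String.ofList else [response]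

-- ===== PRECONDITION & SPEC =====
def Spec_parse_cot_response_py (response : String) (out : List String) : Prop := out = parse_cot_response_py_alt response
instance (response : String) (out : List String) : Decidable (Spec_parse_cot_response_py response out) := by unfold Spec_parse_cot_response_py; infer_instance

-- ===== CLAIM (what is proved, stated in full; the proofs are below) =====
def Claim_equal_parse_cot_response_py : Prop := ∀ (response : String), Dom_parse_cot_response_py response → Spec_parse_cot_response_py response (parse_cot_response_py response)

-- ===== LEMMAS AND PROOFS =====

-- the common grouping of the stripped lines: index 0 starts a group, and every
-- later "Step " line starts a new group
def pvGrp : List (List Char) → List (List (List Char))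
  | [] => []
  | h :: t =>
    (h :: t.takeWhile (fun l => !pvIsStep l)) :: pvGrp (t.dropWhile (fun l => !pvIsStep l))
termination_by ms => ms.length
decreasing_by simpa using Nat.lt_succ_of_le (List.length_dropWhile_le _ t)

-- " ".join g for nonempty g
theorem pv_join_sp (h : List Char) (rest : List (List Char)) :
    PySem.Chars.join [' '] (h :: rest) = h ++ rest.flatMap (fun l => ' ' :: l) := by
  induction rest generalizing h with
  | nil => simp [PySem.Chars.join_singleton]
  | cons b bs ih => rw [PySem.Chars.join_cons_cons, ih b]; simp

theorem pv_strip_space (x : List Char) :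
    PySem.Chars.strip (' ' :: x) = PySem.Chars.strip x := by
  simp [PySem.Chars.strip, PySem.Chars.lstrip, PySem.Chars.isspace]

theorem pv_isStep_ne_nil {x : List Char} (h : pvIsStep x = true) : x ≠ [] := by
  rcases (PySem.Chars.startswith_iff x "Step ".toList).mp h with ⟨t, ht⟩
  intro hx; simp [hx] at ht

-- A's loop, flushed, produces exactly the stripped space-joins of the groups
theorem pvLoopA_spec : ∀ (ls : List (List Char)) (steps : List (List Char)) (cur : List Char),
    cur ≠ [] →
    (pvLoopA ls steps cur).2 ≠ [] ∧
    (pvLoopA ls steps cur).1 ++ [PySem.Chars.strip (pvLoopA ls steps cur).2] =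
      steps ++ PySem.Chars.strip (cur ++ ((ls.map PySem.Chars.strip).takeWhile (fun l => !pvIsStep l)).flatMap (fun l => ' ' :: l)) ::
        (pvGrp ((ls.map PySem.Chars.strip).dropWhile (fun l => !pvIsStep l))).map
          (fun g => PySem.Chars.strip (PySem.Chars.join [' '] g)) := by
  intro ls
  induction ls with
  | nil => intro steps cur hc; simp [pvLoopA, pvGrp, hc]
  | cons l rest ih =>
    intro steps cur hc
    by_cases hs : pvIsStep (PySem.Chars.strip l) = true
    · have hcur : ¬ cur.isEmpty := by simpa [List.isEmpty_iff] using hc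
      have hne : PySem.Chars.strip l ≠ [] := pv_isStep_ne_nil hs
      obtain ⟨h1, h2⟩ := ih (steps ++ [PySem.Chars.strip cur]) (PySem.Chars.strip l) hne
      refine ⟨?_, ?_⟩
      · simpa [pvLoopA, hs, hcur] using h1
      · rw [show pvLoopA (l :: rest) steps cur =
            pvLoopA rest (steps ++ [PySem.Chars.strip cur]) (PySem.Chars.strip l) by
            simp [pvLoopA, hs, hcur]]
        rw [h2]
        simp [hs, pvGrp, pv_join_sp]
    · have hb : (pvIsStep (PySem.Chars.strip l) && !cur.isEmpty) = false := by
        simp [hs]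
      have hne : cur ++ (' ' :: PySem.Chars.strip l) ≠ [] := by simp
      obtain ⟨h1, h2⟩ := ih steps (cur ++ (' ' :: PySem.Chars.strip l)) hne
      refine ⟨?_, ?_⟩
      · simpa [pvLoopA, hb] using h1
      · rw [show pvLoopA (l :: rest) steps cur =
            pvLoopA rest steps (cur ++ (' ' :: PySem.Chars.strip l)) by
            simp [pvLoopA, hb]]
        rw [h2]
        simp [hs]

-- B-side characterisation ---------------------------------------------------

def pvStepIdx (t : List (List Char)) (k : Int) : List Int :=
  (PySem.List.enumerate t k).filterMap (fun q => if pvIsStep q.2 then some q.1 else none)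

theorem pvBounds_pos : ∀ (t : List (List Char)) (k : Int), 0 < k →
    (PySem.List.enumerate t k).filterMap (fun q => if q.1 == 0 || pvIsStep q.2 then some q.1 else none) =
      pvStepIdx t k := by
  intro t
  induction t with
  | nil => intro k hk; simp [pvStepIdx, PySem.List.enumerate]
  | cons a t ih =>
    intro k hk
    have hk0 : (k == 0) = false := by simp; omega
    simp only [pvStepIdx, PySem.List.enumerate, List.filterMap_cons, hk0, Bool.false_or]
    rw [ih (k+1) (by omega)]
    rfl

theorem pvStepIdx_append (pre post : List (List Char)) (k : Int)
    (hp : ∀ l ∈ pre, pvIsStep l = false) :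
    pvStepIdx (pre ++ post) k = pvStepIdx post (k + pre.length) := by
  induction pre generalizing k with
  | nil => simp
  | cons a t ih =>
    have ha := hp a (by simp)
    have h1 := ih (k := k + 1) (fun l hl => hp l (List.mem_cons_of_mem _ hl))
    rw [List.cons_append,
        show pvStepIdx (a :: (t ++ post)) k = pvStepIdx (t ++ post) (k + 1) from by
          simp [pvStepIdx, PySem.List.enumerate, ha],
        h1]
    congr 1
    simp only [List.length_cons]
    push_cast
    ring

theorem pvStepIdx_shift (t : List (List Char)) : ∀ (k d : Int),
    pvStepIdx t (k + d) = (pvStepIdx t k).map (· + d) := by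
  induction t with
  | nil => intro k d; simp [pvStepIdx, PySem.List.enumerate]
  | cons a t ih =>
    intro k d
    simp only [pvStepIdx, PySem.List.enumerate, List.filterMap_cons] at *
    by_cases h : pvIsStep a = true
    · simp only [h, if_pos]
      rw [show k + d + 1 = (k + 1) + d by ring, ih (k+1) d]
      rfl
    · simp only [Bool.not_eq_true] at h
      simp only [h]
      rw [show k + d + 1 = (k + 1) + d by ring]
      exact ih (k+1) d

theorem pvStepIdx_mem (t : List (List Char)) : ∀ (k x : Int),
    x ∈ pvStepIdx t k → k ≤ x ∧ x < k + t.length := by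
  induction t with
  | nil => intro k x hx; simp [pvStepIdx, PySem.List.enumerate] at hx
  | cons a t ih =>
    intro k x hx
    simp only [pvStepIdx, PySem.List.enumerate, List.filterMap_cons] at hx
    by_cases h : pvIsStep a = true
    · simp only [h, if_pos] at hx
      rw [List.mem_cons] at hx
      rcases hx with rfl | hx
      · simp only [List.length_cons]
        push_cast
        omega
      · have := ih (k+1) x hx
        simp only [List.length_cons] at this ⊢
        push_cast at this ⊢
        omega
    · simp only [Bool.not_eq_true] at h
      simp only [h] at hx
      have := ih (k+1) x hx
      simp only [List.length_cons] at this ⊢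
      push_cast at this ⊢
      omega

theorem pvBounds_cons (h : List Char) (t : List (List Char)) :
    pvBounds (h :: t) = 0 :: pvStepIdx t 1 := by
  simp only [pvBounds, PySem.List.enumerate, List.filterMap_cons]
  have h01 : (0:Int) + 1 = 1 := by norm_num
  rw [h01, pvBounds_pos t 1 (by norm_num)]
  simp

def pvBGroups (ms : List (List Char)) : List (List (List Char)) :=
  ((pvBounds ms).zip ((pvBounds ms).tail ++ [(ms.length : Int)])).map
    (fun q => PySem.List.slice ms (some q.1) (some q.2))

theorem pv_dropWhile_head {p : List Char → Bool} {t : List (List Char)} {s : List Char}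
    {rest : List (List Char)} (h : t.dropWhile p = s :: rest) : p s = false := by
  induction t with
  | nil => simp at h
  | cons a t ih =>
    by_cases hp : p a = true
    · exact ih (by simpa [List.dropWhile_cons, hp] using h)
    · simp only [Bool.not_eq_true] at hp
      have h2 : a :: t = s :: rest := by simpa [List.dropWhile_cons, hp] using h
      cases h2
      exact hp

theorem pv_slice_shift {α : Type} (xs ys : List α) (a b : Nat) :
    PySem.List.slice (xs ++ ys) (some ((a : Int) + xs.length)) (some ((b : Int) + xs.length)) =
      PySem.List.slice ys (some (a : Int)) (some (b : Int)) := by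
  rw [show ((a : Int) + xs.length) = ((a + xs.length : Nat) : Int) from by push_cast; ring,
      show ((b : Int) + xs.length) = ((b + xs.length : Nat) : Int) from by push_cast; ring,
      PySem.List.slice_natCast, PySem.List.slice_natCast,
      show b + xs.length - (a + xs.length) = b - a from by omega,
      List.drop_append, List.drop_eq_nil_of_le (by omega), List.nil_append,
      show a + xs.length - xs.length = a from by omega]

theorem pv_slice_prefix {α : Type} (xs ys : List α) :
    PySem.List.slice (xs ++ ys) (some (0 : Int)) (some (xs.length : Int)) = xs := by
  rw [show (0 : Int) = ((0 : Nat) : Int) from by simp, PySem.List.slice_natCast]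
  simp [List.take_left (l₁ := xs) (l₂ := ys)]

theorem pv_bgroups_cons (h : List Char) (pre post : List (List Char))
    (hpre : ∀ l ∈ pre, pvIsStep l = false)
    (hhead : ∀ s rest, post = s :: rest → pvIsStep s = true) :
    pvBGroups (h :: (pre ++ post)) = (h :: pre) :: pvBGroups post := by
  have hb : pvBounds (h :: (pre ++ post)) = 0 :: pvStepIdx post (1 + (pre.length : Int)) := by
    rw [pvBounds_cons, pvStepIdx_append pre post 1 hpre]
  cases hpost : post with
  | nil =>
    subst hpost
    have hsi : pvStepIdx ([] : List (List Char)) (1 + (pre.length : Int)) = [] := by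
      simp [pvStepIdx, PySem.List.enumerate]
    rw [hsi] at hb
    simp only [List.append_nil] at hb ⊢
    simp only [pvBGroups]
    rw [hb]
    simp [pvBounds, PySem.List.enumerate]
    rw [show ((pre.length : Int) + 1) = (((h :: pre).length : Nat) : Int) from by simp [List.length_cons],
        PySem.List.slice_to _ (Int.natCast_nonneg _)]
    simp
  | cons s rest =>
    have hstep : pvIsStep s = true := hhead s rest hpost
    subst hpost
    have hS : pvStepIdx (s :: rest) (1 + (pre.length : Int)) =
        (pvBounds (s :: rest)).map (· + ((pre.length : Int) + 1)) := by
      rw [pvBounds_cons s rest,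
          show pvStepIdx (s :: rest) (1 + (pre.length : Int)) =
            (1 + (pre.length : Int)) :: pvStepIdx rest (1 + (pre.length : Int) + 1) from by
            simp [pvStepIdx, PySem.List.enumerate, hstep],
          List.map_cons]
      congr 1
      · ring
      · rw [show (1 + (pre.length : Int) + 1) = 1 + ((pre.length : Int) + 1) from by ring,
            pvStepIdx_shift rest 1 ((pre.length : Int) + 1)]
    have hc : ((pre.length : Int) + 1) = ((h :: pre).length : Int) := by
      simp [List.length_cons]
    have hn : ((h :: (pre ++ s :: rest)).length : Int) =
        ((s :: rest).length : Int) + ((pre.length : Int) + 1) := by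
      simp only [List.length_cons, List.length_append]
      push_cast
      ring
    have hBpost : pvBounds (s :: rest) = 0 :: pvStepIdx rest 1 := pvBounds_cons s rest
    simp only [pvBGroups]
    rw [hb, hS, hBpost]
    simp only [List.map_cons, List.tail_cons, List.cons_append]
    rw [List.zip_cons_cons]
    rw [show ((0 : Int) + ((pre.length : Int) + 1)) :: (pvStepIdx rest 1).map (· + ((pre.length : Int) + 1)) =
          ((0 :: pvStepIdx rest 1).map (· + ((pre.length : Int) + 1))) from by simp,
        show (pvStepIdx rest 1).map (· + ((pre.length : Int) + 1)) ++ [((h :: (pre ++ s :: rest)).length : Int)] =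
          ((pvStepIdx rest 1 ++ [((s :: rest).length : Int)]).map (· + ((pre.length : Int) + 1))) from by
          rw [List.map_append]
          simp only [List.map_singleton, List.append_cancel_left_eq, List.cons.injEq, and_true]
          rw [hn],
        List.zip_map]
    simp only [List.map_cons, List.map_map]
    congr 1
    · rw [show ((0 : Int) + ((pre.length : Int) + 1)) = ((h :: pre).length : Int) from by
          rw [zero_add, hc]]
      exact pv_slice_prefix (h :: pre) (s :: rest)
    · refine List.map_congr_left ?_
      intro q hq
      obtain ⟨x, y⟩ := q
      obtain ⟨hx, hy⟩ := List.of_mem_zip hq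
      have hx0 : 0 ≤ x := by
        rcases List.mem_cons.mp hx with rfl | h'
        · norm_num
        · have := pvStepIdx_mem rest 1 x h'
          omega
      have hy0 : 0 ≤ y := by
        rcases List.mem_append.mp hy with h' | h'
        · have := pvStepIdx_mem rest 1 y h'
          omega
        · rw [List.mem_singleton] at h'
          subst h'
          exact Int.natCast_nonneg _
      simp only [Function.comp_apply, Prod.map_apply]
      rw [show x = ((x.toNat : Int)) from (Int.toNat_of_nonneg hx0).symm,
          show y = ((y.toNat : Int)) from (Int.toNat_of_nonneg hy0).symm,
          show ((x.toNat : Int) + ((pre.length : Int) + 1)) = ((x.toNat : Int) + ((h :: pre).length : Int)) from by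
            rw [hc],
          show ((y.toNat : Int) + ((pre.length : Int) + 1)) = ((y.toNat : Int) + ((h :: pre).length : Int)) from by
            rw [hc]]
      exact pv_slice_shift (h :: pre) (s :: rest) x.toNat y.toNat

theorem pvBGroups_eq : ∀ (ms : List (List Char)), pvBGroups ms = pvGrp ms
  | [] => by simp [pvBGroups, pvBounds, pvGrp, PySem.List.enumerate]
  | h :: t => by
    have hsplit : t.takeWhile (fun l => !pvIsStep l) ++ t.dropWhile (fun l => !pvIsStep l) = t :=
      List.takeWhile_append_dropWhile
    have hpre : ∀ l ∈ t.takeWhile (fun l => !pvIsStep l), pvIsStep l = false := by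
      intro l hl
      simpa using List.mem_takeWhile_imp hl
    have hhead : ∀ s rest, t.dropWhile (fun l => !pvIsStep l) = s :: rest → pvIsStep s = true := by
      intro s rest hsr
      simpa using pv_dropWhile_head hsr
    have hrec := pvBGroups_eq (t.dropWhile (fun l => !pvIsStep l))
    calc pvBGroups (h :: t)
        = pvBGroups (h :: (t.takeWhile (fun l => !pvIsStep l) ++ t.dropWhile (fun l => !pvIsStep l))) := by
          rw [hsplit]
      _ = (h :: t.takeWhile (fun l => !pvIsStep l)) :: pvBGroups (t.dropWhile (fun l => !pvIsStep l)) :=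
          pv_bgroups_cons h _ _ hpre hhead
      _ = pvGrp (h :: t) := by rw [hrec, pvGrp]
termination_by ms => ms.length
decreasing_by simpa using Nat.lt_succ_of_le (List.length_dropWhile_le _ t)

-- the common core: A's flushed loop equals B's stripped-join of the sliced groups
theorem pv_core (ls : List (List Char)) :
    (if !(pvLoopA ls [] []).2.isEmpty then
        (pvLoopA ls [] []).1 ++ [PySem.Chars.strip (pvLoopA ls [] []).2]
      else (pvLoopA ls [] []).1)
      = (pvBGroups (ls.map PySem.Chars.strip)).map
          (fun g => PySem.Chars.strip (PySem.Chars.join [' '] g)) := by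
  cases ls with
  | nil => simp [pvLoopA, pvBGroups, pvBounds]
  | cons h t =>
    obtain ⟨h1, h2⟩ := pvLoopA_spec t [] (' ' :: PySem.Chars.strip h) (by simp)
    rw [show pvLoopA (h :: t) [] [] = pvLoopA t [] (' ' :: PySem.Chars.strip h) from by
        simp [pvLoopA]]
    have hcond : (pvLoopA t [] (' ' :: PySem.Chars.strip h)).2.isEmpty = false := by
      simpa [List.isEmpty_iff] using h1
    simp only [hcond, Bool.not_false, if_true]
    rw [h2, pvBGroups_eq]
    simp only [List.map_cons, List.nil_append]
    rw [pvGrp]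
    simp only [List.map_cons]
    congr 1
    rw [pv_join_sp,
        show ((' ' :: PySem.Chars.strip h) ++
            ((t.map PySem.Chars.strip).takeWhile (fun l => !pvIsStep l)).flatMap (fun l => ' ' :: l)) =
          ' ' :: (PySem.Chars.strip h ++
            ((t.map PySem.Chars.strip).takeWhile (fun l => !pvIsStep l)).flatMap (fun l => ' ' :: l)) from rfl,
        pv_strip_space]

-- ===== VERDICT (by name: the statement is the Claim_ definition above) =====
theorem parse_cot_response_py_spec : Claim_equal_parse_cot_response_py := by
  intro response _
  show parse_cot_response_py response = parse_cot_response_py_alt response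
  simp only [parse_cot_response_py, parse_cot_response_py_alt]
  rw [pv_core (PySem.Chars.splitOn response.toList ['\n'])]
  simp only [pvBGroups]
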